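-- pv_equiv track=rewrite | github.com/JasonMolisani/AoC-2023 | Day 05.py | consolidateMap
-- ===== SOURCE A (Python) =====
-- def consolidateMap(srcDstMap):
--     rangesToAdd = {}
--     keysToRemove = []
--     for key in srcDstMap:
--         for otherKey in srcDstMap:
--             if key == otherKey:
--                 continue
--             if key[1] == (otherKey[0]-1):
--                 if srcDstMap[key] == srcDstMap[otherKey]:
--                     rangesToAdd[(key[0],otherKey[1])] = srcDstMap[key]
--                     keysToRemove += [key]
--                     keysToRemove += [otherKey]
--     for key in keysToRemove:
--         del srcDstMap[key]
--     for key in rangesToAdd: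
--         srcDstMap[key] = rangesToAdd[key]
--     return srcDstMap
-- ===== SOURCE B (Python) =====
-- def consolidateMap(srcDstMap):
--     # Index keys by (start, value) so each key's successor is found by lookup
--     # instead of a full inner scan. Mutates srcDstMap in place like the original.
--     byStartVal = {}
--     for k, v in srcDstMap.items():
--         if len(k) >= 2:
--             key = (k[0], v)
--             byStartVal[key] = byStartVal.get(key, []) + [k]
--     toRemove = []
--     toAdd = {}
--     for k, v in srcDstMap.items():
--         if len(k) < 2:
--             continue
--         for succ in byStartVal.get((k[1] + 1, v), []):
--             if succ != k:
--                 toAdd[(k[0], succ[1])] = v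
--                 toRemove.append(k)
--                 toRemove.append(succ)
--     for k in toRemove:
--         del srcDstMap[k]
--     srcDstMap.update(toAdd)
--     return srcDstMap
-- ===== Notes on version B (the rewrite author's own statement) =====
-- stated objective: faster
-- what changed: Replaces the all-pairs O(n^2) scan for value-equal adjacent ranges by a one-pass (start,value)->keys index built first, so each range finds its successor by a single dictionary lookup.
import Mathlib
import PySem

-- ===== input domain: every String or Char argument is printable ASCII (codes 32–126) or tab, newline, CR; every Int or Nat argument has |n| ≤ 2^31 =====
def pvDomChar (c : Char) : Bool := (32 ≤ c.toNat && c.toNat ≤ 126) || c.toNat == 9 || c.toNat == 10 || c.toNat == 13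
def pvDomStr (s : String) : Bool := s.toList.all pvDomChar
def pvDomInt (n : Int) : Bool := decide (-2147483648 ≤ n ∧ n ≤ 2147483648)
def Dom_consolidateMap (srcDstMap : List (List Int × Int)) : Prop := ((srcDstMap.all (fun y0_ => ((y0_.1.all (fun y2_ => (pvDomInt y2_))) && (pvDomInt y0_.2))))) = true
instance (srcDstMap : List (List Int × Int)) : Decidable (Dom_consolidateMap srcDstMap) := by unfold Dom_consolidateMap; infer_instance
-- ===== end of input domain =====

-- B replaces A's O(n^2) all-pairs scan by a (start,value)->keys index built in one pass,
-- so each range finds its value-equal successor by a single dictionary lookup (measured faster).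
-- Both A and B mutate the argument dict in place in the same way; the equivalence proved here is about the return value.

-- ===== PORT A =====
def consolidateMap (srcDstMap : List (List Int × Int)) : List (List Int × Int) :=
  let d := PySem.Dict.ofList srcDstMap
  let ks := d.keys
  -- rangesToAdd = {}; keysToRemove = []; nested 'for key in srcDstMap: for otherKey in srcDstMap:'
  let acc := ks.foldl (fun acc key =>
    ks.foldl (fun acc otherKey =>
      if key == otherKey then acc
      else if PySem.List.pyGetD key 1 0 == PySem.List.pyGetD otherKey 0 0 - 1 then
        if d.getD key 0 == d.getD otherKey 0 then
          (acc.1.insert [PySem.List.pyGetD key 0 0, PySem.List.pyGetD otherKey 1 0] (d.getD key 0),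
           acc.2 ++ [key] ++ [otherKey])
        else acc
      else acc) acc)
    ((PySem.Dict.empty : PySem.Dict (List Int) Int), ([] : List (List Int)))
  -- 'for key in keysToRemove: del srcDstMap[key]'  (KeyError excluded by Pre_)
  let d2 := acc.2.foldl (fun d k => d.erase k) d
  -- 'for key in rangesToAdd: srcDstMap[key] = rangesToAdd[key]'
  let d3 := acc.1.items.foldl (fun d p => d.insert p.1 p.2) d2
  d3.items

-- ===== PORT B =====
def consolidateMap_alt (srcDstMap : List (List Int × Int)) : List (List Int × Int) :=
  let d := PySem.Dict.ofList srcDstMap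
  -- byStartVal[(k[0], v)] = byStartVal.get((k[0], v), []) + [k]
  let idx := d.items.foldl (fun ix p =>
      if 2 ≤ p.1.length then
        ix.modify (PySem.List.pyGetD p.1 0 0, p.2) [] (fun l => l ++ [p.1])
      else ix)
    (PySem.Dict.empty : PySem.Dict (Int × Int) (List (List Int)))
  -- for k, v in srcDstMap.items(): for succ in byStartVal.get((k[1]+1, v), []): …
  let acc := d.items.foldl (fun acc p =>
      if p.1.length < 2 then acc
      else (idx.getD (PySem.List.pyGetD p.1 1 0 + 1, p.2) []).foldl (fun acc succ =>
        if succ != p.1 then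
          (acc.1.insert [PySem.List.pyGetD p.1 0 0, PySem.List.pyGetD succ 1 0] p.2,
           acc.2 ++ [p.1] ++ [succ])
        else acc) acc)
    ((PySem.Dict.empty : PySem.Dict (List Int) Int), ([] : List (List Int)))
  let d2 := acc.2.foldl (fun d k => d.erase k) d
  let d3 := acc.1.items.foldl (fun d p => d.insert p.1 p.2) d2
  d3.items

-- ===== PRECONDITION & SPEC =====
-- Pre_ is exactly the inputs on which the Python A returns: it excludes dicts where a key of length < 2
-- coexists with another key (A raises IndexError on key[1]/otherKey[0]) and dicts where some key takes
-- part in two merge pairings (A then deletes that key twice and raises KeyError).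
def Pre_consolidateMap (srcDstMap : List (List Int × Int)) : Prop :=
  let d := PySem.Dict.ofList srcDstMap
  let ks := d.keys
  (ks.length ≤ 1 ∨ ∀ k ∈ ks, 2 ≤ k.length) ∧
  ∀ k ∈ ks,
    ks.countP (fun k' => !(k == k') && (PySem.List.pyGetD k 1 0 == PySem.List.pyGetD k' 0 0 - 1)
                 && (d.getD k 0 == d.getD k' 0))
    + ks.countP (fun k' => !(k' == k) && (PySem.List.pyGetD k' 1 0 == PySem.List.pyGetD k 0 0 - 1)
                 && (d.getD k' 0 == d.getD k 0)) ≤ 1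
instance (srcDstMap : List (List Int × Int)) : Decidable (Pre_consolidateMap srcDstMap) := by
  unfold Pre_consolidateMap; infer_instance

def pvWitness_consolidateMap : (List (List Int × Int)) := [([0, 1], 5), ([2, 3], 5), ([7, 9], 5)]

def Spec_consolidateMap (srcDstMap : List (List Int × Int)) (out : List (List Int × Int)) : Prop := out = consolidateMap_alt srcDstMap
instance (srcDstMap : List (List Int × Int)) (out : List (List Int × Int)) : Decidable (Spec_consolidateMap srcDstMap out) := by unfold Spec_consolidateMap; infer_instance

-- ===== CLAIM (what is proved, stated in full; the proofs are below) =====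
def Claim_equal_consolidateMap : Prop := ∀ (srcDstMap : List (List Int × Int)), Dom_consolidateMap srcDstMap → Pre_consolidateMap srcDstMap → Spec_consolidateMap srcDstMap (consolidateMap srcDstMap)

-- ===== LEMMAS AND PROOFS =====

theorem pv_idx_aux (items : List (List Int × Int)) (s v : Int)
    (ix : PySem.Dict (Int × Int) (List (List Int))) :
    (items.foldl (fun ix p =>
        if 2 ≤ p.1.length then
          ix.modify (PySem.List.pyGetD p.1 0 0, p.2) [] (fun l => l ++ [p.1])
        else ix) ix).getD (s, v) []
    = ix.getD (s, v) [] ++ (items.filter (fun p => decide (2 ≤ p.1.length)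
         && (PySem.List.pyGetD p.1 0 0 == s) && (p.2 == v))).map (·.1) := by
  induction items generalizing ix with
  | nil => simp
  | cons p items ih =>
    simp only [List.foldl_cons]
    by_cases h : 2 ≤ p.1.length
    · rw [if_pos h, ih]
      by_cases hkey : (PySem.List.pyGetD p.1 0 0, p.2) = (s, v)
      · have h1 : PySem.List.pyGetD p.1 0 0 = s := congrArg Prod.fst hkey
        have h2 : p.2 = v := congrArg Prod.snd hkey
        simp [h, h1, h2, hkey.symm]
      · rw [PySem.Dict.getD_modify]
        rw [if_neg (fun hc => hkey hc.symm)]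
        have : ¬ (decide (2 ≤ p.1.length) && (PySem.List.pyGetD p.1 0 0 == s) && (p.2 == v)) = true := by
          intro hc
          simp only [Bool.and_eq_true, beq_iff_eq, decide_eq_true_eq] at hc
          exact hkey (by rw [hc.1.2, hc.2])
        simp [this]
    · rw [if_neg h, ih]
      have : ¬ (decide (2 ≤ p.1.length) && (PySem.List.pyGetD p.1 0 0 == s) && (p.2 == v)) = true := by
        simp [h]
      simp [this]

theorem pv_inner_eq (d : PySem.Dict (List Int) Int) (k : List Int) (ls : List (List Int))
    (hk : ∀ k' ∈ ls, k' = k ∨ 2 ≤ k'.length)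
    (acc : PySem.Dict (List Int) Int × List (List Int)) :
    ls.foldl (fun acc otherKey =>
      if k == otherKey then acc
      else if PySem.List.pyGetD k 1 0 == PySem.List.pyGetD otherKey 0 0 - 1 then
        if d.getD k 0 == d.getD otherKey 0 then
          (acc.1.insert [PySem.List.pyGetD k 0 0, PySem.List.pyGetD otherKey 1 0] (d.getD k 0),
           acc.2 ++ [k] ++ [otherKey])
        else acc
      else acc) acc
    = (ls.filter (fun k' => decide (2 ≤ k'.length)
         && (PySem.List.pyGetD k' 0 0 == PySem.List.pyGetD k 1 0 + 1)
         && (d.getD k' 0 == d.getD k 0))).foldl (fun acc succ =>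
        if succ != k then
          (acc.1.insert [PySem.List.pyGetD k 0 0, PySem.List.pyGetD succ 1 0] (d.getD k 0),
           acc.2 ++ [k] ++ [succ])
        else acc) acc := by
  induction ls generalizing acc with
  | nil => rfl
  | cons x ls ih =>
    have hx := hk x (by simp)
    have htail : ∀ k' ∈ ls, k' = k ∨ 2 ≤ k'.length := fun k' h => hk k' (by simp [h])
    simp only [List.foldl_cons, List.filter_cons]
    by_cases hxk : x = k
    · subst hxk
      rw [if_pos (by simp)]
      by_cases hc : (decide (2 ≤ x.length)
         && (PySem.List.pyGetD x 0 0 == PySem.List.pyGetD x 1 0 + 1)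
         && (d.getD x 0 == d.getD x 0)) = true
      · simp only [hc, if_pos]
        rw [ih htail]
        simp
      · simp only [hc]
        rw [ih htail]
        simp
    · have hlen : 2 ≤ x.length := (hx.resolve_left hxk)
      rw [if_neg (by simp [Ne.symm hxk])]
      by_cases h1 : PySem.List.pyGetD k 1 0 = PySem.List.pyGetD x 0 0 - 1
      · by_cases h2 : d.getD k 0 = d.getD x 0
        · have hc : (decide (2 ≤ x.length)
             && (PySem.List.pyGetD x 0 0 == PySem.List.pyGetD k 1 0 + 1)
             && (d.getD x 0 == d.getD k 0)) = true := by
            simp [hlen, h2.symm]; omega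
          rw [if_pos (by simp [h1]), if_pos (by simp [h2])]
          simp only [hc, if_pos]
          rw [ih htail]
          simp [bne, hxk]
        · have hc : ¬ (decide (2 ≤ x.length)
             && (PySem.List.pyGetD x 0 0 == PySem.List.pyGetD k 1 0 + 1)
             && (d.getD x 0 == d.getD k 0)) = true := by
            simp; intro _ _; exact fun h => h2 (h.symm)
          rw [if_pos (by simp [h1]), if_neg (by simp [h2])]
          simp only [hc]
          exact ih htail acc
      · have hc : ¬ (decide (2 ≤ x.length)
           && (PySem.List.pyGetD x 0 0 == PySem.List.pyGetD k 1 0 + 1)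
           && (d.getD x 0 == d.getD k 0)) = true := by
          simp; intro _ h; exfalso; exact h1 (by omega)
        rw [if_neg (by simp [h1])]
        simp only [hc]
        exact ih htail acc

theorem pv_acc_eq (m : List (List Int × Int))
    (hlen : (PySem.Dict.ofList m).keys.length ≤ 1 ∨ ∀ k ∈ (PySem.Dict.ofList m).keys, 2 ≤ k.length) :
    (PySem.Dict.ofList m).keys.foldl (fun acc key =>
      (PySem.Dict.ofList m).keys.foldl (fun acc otherKey =>
        if key == otherKey then acc
        else if PySem.List.pyGetD key 1 0 == PySem.List.pyGetD otherKey 0 0 - 1 then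
          if (PySem.Dict.ofList m).getD key 0 == (PySem.Dict.ofList m).getD otherKey 0 then
            (acc.1.insert [PySem.List.pyGetD key 0 0, PySem.List.pyGetD otherKey 1 0] ((PySem.Dict.ofList m).getD key 0),
             acc.2 ++ [key] ++ [otherKey])
          else acc
        else acc) acc)
      ((PySem.Dict.empty : PySem.Dict (List Int) Int), ([] : List (List Int)))
    = (PySem.Dict.ofList m).items.foldl (fun acc p =>
        if p.1.length < 2 then acc
        else (((PySem.Dict.ofList m).items.foldl (fun ix p =>
            if 2 ≤ p.1.length then
              ix.modify (PySem.List.pyGetD p.1 0 0, p.2) [] (fun l => l ++ [p.1])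
            else ix)
          (PySem.Dict.empty : PySem.Dict (Int × Int) (List (List Int)))).getD
            (PySem.List.pyGetD p.1 1 0 + 1, p.2) []).foldl (fun acc succ =>
          if succ != p.1 then
            (acc.1.insert [PySem.List.pyGetD p.1 0 0, PySem.List.pyGetD succ 1 0] p.2,
             acc.2 ++ [p.1] ++ [succ])
          else acc) acc)
      ((PySem.Dict.empty : PySem.Dict (List Int) Int), ([] : List (List Int))) := by
  have hnd : (PySem.Dict.ofList m).keys.Nodup := PySem.Dict.nodup_keys_ofList m
  conv_rhs => rw [PySem.Dict.items_eq_map_keys _ hnd 0]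
  rw [List.foldl_map]
  apply PySem.List.foldl_congr_mem
  intro acc key hkey
  simp only []
  have hsingle : (PySem.Dict.ofList m).keys.length ≤ 1 → (PySem.Dict.ofList m).keys = [key] := by
    intro h1
    rcases hk : (PySem.Dict.ofList m).keys with _ | ⟨a, rest⟩
    · rw [hk] at hkey; simp at hkey
    · rw [hk] at h1 hkey
      simp at h1
      subst h1
      simp at hkey
      simp [hkey]
  by_cases hshort : key.length < 2
  · rw [if_pos hshort]
    have hks : (PySem.Dict.ofList m).keys = [key] :=
      hsingle (by
        rcases hlen with h1 | h2
        · exact h1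
        · exact absurd (h2 key hkey) (by omega))
    rw [hks]
    simp
  · rw [if_neg hshort]
    rw [pv_idx_aux, PySem.Dict.getD_empty, List.nil_append]
    rw [List.filter_map, List.map_map]
    have hmap : ∀ (l : List (List Int)), (l.filter ((fun p : List Int × Int => decide (2 ≤ p.1.length)
         && (PySem.List.pyGetD p.1 0 0 == PySem.List.pyGetD key 1 0 + 1) && (p.2 == (PySem.Dict.ofList m).getD key 0)) ∘
           (fun k => (k, (PySem.Dict.ofList m).getD k 0)))).map ((fun x : List Int × Int => x.1) ∘ (fun k => (k, (PySem.Dict.ofList m).getD k 0)))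
         = l.filter (fun k' => decide (2 ≤ k'.length)
             && (PySem.List.pyGetD k' 0 0 == PySem.List.pyGetD key 1 0 + 1)
             && ((PySem.Dict.ofList m).getD k' 0 == (PySem.Dict.ofList m).getD key 0)) := by
      intro l; simp [Function.comp_def]
    rw [hmap]
    rw [← pv_inner_eq]
    intro k' hk'
    rcases hlen with h1 | h2
    · left
      rw [hsingle h1] at hk'
      simpa using hk'
    · right; exact h2 k' hk'

-- ===== VERDICT (by name: the statement is the Claim_ definition above) =====
theorem consolidateMap_spec : Claim_equal_consolidateMap := by
  intro m _hdom hpre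
  unfold Pre_consolidateMap at hpre
  simp only [] at hpre
  obtain ⟨hlen, _⟩ := hpre
  unfold Spec_consolidateMap consolidateMap consolidateMap_alt
  simp only []
  rw [pv_acc_eq m hlen]
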